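-- pv_equiv track=rewrite | github.com/stevecarrea/ny_caa_permitParser | ny_caa_permit_parser.py | rest_of_file_segment
-- ===== SOURCE A (Python) =====
-- def rest_of_file_segment(cleaned):
--     records = []
--     record = []
--     start = False
--
--     for ind, line in enumerate(cleaned):
--         first = "Emission Unit:" in line
--         if first:
--             start = True
--         if start:
--             records.append(line)
--     return records
-- ===== SOURCE B (Python) =====
-- def rest_of_file_segment(cleaned):
--     start = next((i for i, line in enumerate(cleaned) if "Emission Unit:" in line), None)
--     if start is None:
--         return []
--     return cleaned[start:]
-- ===== Notes on version B (the rewrite author's own statement) =====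
-- stated objective: simpler
-- what changed: Replaces the flag-plus-accumulator pass with locate-the-first-marker-index then slice the tail (next over enumerate, then cleaned[start:]).
import Mathlib
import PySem

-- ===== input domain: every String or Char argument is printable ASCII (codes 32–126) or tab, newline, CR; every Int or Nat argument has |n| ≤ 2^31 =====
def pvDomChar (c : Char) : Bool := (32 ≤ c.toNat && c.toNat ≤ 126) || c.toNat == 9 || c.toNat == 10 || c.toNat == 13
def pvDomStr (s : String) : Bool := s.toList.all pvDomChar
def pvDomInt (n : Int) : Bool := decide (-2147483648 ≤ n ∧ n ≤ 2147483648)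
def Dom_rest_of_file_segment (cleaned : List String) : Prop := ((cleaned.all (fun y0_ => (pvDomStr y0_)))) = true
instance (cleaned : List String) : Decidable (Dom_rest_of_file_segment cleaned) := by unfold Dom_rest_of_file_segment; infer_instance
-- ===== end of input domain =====

-- B replaces A's flag-plus-accumulator pass with locate-first-marker-index then slice (simpler decomposition, same cost).


-- ===== PORT A =====
def rest_of_file_segment (cleaned : List String) : List String :=
  (cleaned.foldl
    (fun (st : List String × Bool) line =>
      let first := PySem.Str.isIn "Emission Unit:" line
      let start := if first then true else st.2
      (if start then st.1 ++ [line] else st.1, start))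
    ([], false)).1

-- ===== PORT B =====
def rest_of_file_segment_alt (cleaned : List String) : List String :=
  match cleaned.findIdx? (fun line => PySem.Str.isIn "Emission Unit:" line) with
  | none => []
  | some i => PySem.List.slice cleaned (some (i : Int)) none

-- ===== PRECONDITION & SPEC =====
def Spec_rest_of_file_segment (cleaned : List String) (out : List String) : Prop := out = rest_of_file_segment_alt cleaned
instance (cleaned : List String) (out : List String) : Decidable (Spec_rest_of_file_segment cleaned out) := by unfold Spec_rest_of_file_segment; infer_instance

-- ===== CLAIM (what is proved, stated in full; the proofs are below) =====
def Claim_equal_rest_of_file_segment : Prop := ∀ (cleaned : List String), Dom_rest_of_file_segment cleaned → Spec_rest_of_file_segment cleaned (rest_of_file_segment cleaned)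

-- ===== LEMMAS AND PROOFS =====

-- Once the flag is set, A appends every remaining line.
theorem foldA_true (l : List String) (acc : List String) :
    (l.foldl
      (fun (st : List String × Bool) line =>
        let first := PySem.Str.isIn "Emission Unit:" line
        let start := if first then true else st.2
        (if start then st.1 ++ [line] else st.1, start))
      (acc, true)).1 = acc ++ l := by
  induction l generalizing acc with
  | nil => simp
  | cons h t ih =>
    rw [List.foldl_cons]
    simpa using ih (acc ++ [h])

theorem foldA_eq (l : List String) :
    (l.foldl
      (fun (st : List String × Bool) line =>
        let first := PySem.Str.isIn "Emission Unit:" line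
        let start := if first then true else st.2
        (if start then st.1 ++ [line] else st.1, start))
      ([], false)).1 =
    (match l.findIdx? (fun line => PySem.Str.isIn "Emission Unit:" line) with
     | none => []
     | some i => l.drop i) := by
  induction l with
  | nil => simp
  | cons h t ih =>
    by_cases hh : PySem.Str.isIn "Emission Unit:" h = true
    · have h1 := foldA_true t [h]
      simp only [List.foldl_cons, List.findIdx?_cons]
      simp only [hh] at *
      simpa using h1
    · simp only [List.foldl_cons, List.findIdx?_cons]
      simp only [hh] at *
      simp only [Bool.false_eq_true, if_false] at *
      rw [ih]
      cases hf : t.findIdx? (fun line => PySem.Str.isIn "Emission Unit:" line) <;>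
        simp

-- ===== VERDICT (by name: the statement is the Claim_ definition above) =====
theorem rest_of_file_segment_spec : Claim_equal_rest_of_file_segment := by
  intro cleaned _
  unfold Spec_rest_of_file_segment rest_of_file_segment rest_of_file_segment_alt
  rw [foldA_eq]
  cases hf : cleaned.findIdx? (fun line => PySem.Str.isIn "Emission Unit:" line) with
  | none => rfl
  | some i => simp [PySem.List.slice_from_natCast]
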